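-- pv_equiv track=rewrite | github.com/syi07030/Algorithm | 디스크 컨트롤러[level3]/mycode.py | duringTask
-- ===== SOURCE A (Python) =====
-- def duringTask(current, jobs):
--     task = []
--     rest = []
--     for index,j in enumerate(jobs):
--         if j[0]<current:
--             task.append(j)
--             task.sort(key=lambda x:x[1])
--         else:
--             rest.append(j)
--             break
--     time = current
--     result=[time+task[0][1]-task[0][0]]
--     time += task[0][1]
--
--     restSort = task[1:] + rest
--
--     return  time, result, restSort
-- ===== SOURCE B (Python) =====
-- def duringTask(current, jobs):
--     k = 0
--     while k < len(jobs) and jobs[k][0] < current: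
--         k += 1
--     pool = jobs[:k]
--     task = []
--     while pool:
--         b = min(pool, key=lambda x: x[1])
--         task.append(b)
--         pool.remove(b)
--     time = current + task[0][1]
--     return time, [time - task[0][0]], task[1:] + jobs[k:k+1]
-- ===== Notes on version B (the rewrite author's own statement) =====
-- stated objective: alternative
-- what changed: B replaces A's sort-after-every-append loop by a stable selection sort: it repeatedly extracts the first minimum-duration job from the qualifying prefix with min(key=...)/remove, never calling sort.
import Mathlib
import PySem

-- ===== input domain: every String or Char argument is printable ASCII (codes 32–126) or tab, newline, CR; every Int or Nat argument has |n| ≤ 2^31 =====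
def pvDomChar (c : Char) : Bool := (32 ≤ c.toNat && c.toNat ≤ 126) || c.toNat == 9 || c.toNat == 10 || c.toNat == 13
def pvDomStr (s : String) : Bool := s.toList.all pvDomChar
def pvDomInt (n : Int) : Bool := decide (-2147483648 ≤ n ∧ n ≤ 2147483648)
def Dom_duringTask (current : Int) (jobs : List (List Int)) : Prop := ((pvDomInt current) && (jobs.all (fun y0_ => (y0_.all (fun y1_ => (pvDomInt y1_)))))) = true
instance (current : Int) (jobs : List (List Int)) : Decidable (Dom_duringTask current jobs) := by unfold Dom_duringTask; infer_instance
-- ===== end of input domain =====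

-- B sorts the qualifying prefix by stable selection: it repeatedly extracts the first
-- minimum-duration job with min(key=...)/remove, instead of A's re-sorting the growing
-- task list after every append (alternative algorithm; no speed claim).


-- ===== PORT A =====
-- key=lambda x: x[1]  (within Pre_ every sorted element has length ≥ 2, so pyGet? is some)
def pvKey (x : List Int) : Int := (PySem.List.pyGet? x 1).getD 0

-- j[0] < current  (within Pre_ every scanned job is nonempty, so pyGet? is some)
def pvCond (current : Int) (j : List Int) : Bool := decide ((PySem.List.pyGet? j 0).getD 0 < current)

-- A's for-loop: append + re-sort on each qualifying job, break (recording the job in rest) on the first other one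
def pvALoop (current : Int) (task rest : List (List Int)) : List (List Int) → List (List Int) × List (List Int)
  | [] => (task, rest)
  | j :: js =>
      if pvCond current j then
        pvALoop current (PySem.List.sorted (task ++ [j]) pvKey false) rest js
      else
        (task, rest ++ [j])

def duringTask (current : Int) (jobs : List (List Int)) : Int × List Int × List (List Int) :=
  let tr := pvALoop current [] [] jobs
  let task := tr.1
  let rest := tr.2
  let t0 := (PySem.List.pyGet? task 0).getD []   -- task[0]
  let time := current
  let result := [time + (PySem.List.pyGet? t0 1).getD 0 - (PySem.List.pyGet? t0 0).getD 0]
  let time2 := time + (PySem.List.pyGet? t0 1).getD 0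
  let restSort := PySem.List.slice task (some 1) none ++ rest   -- task[1:] + rest
  (time2, result, restSort)

-- ===== PORT B =====
-- termination helper for B's selection loop: removing the selected job shrinks the pool
lemma pv_remove_getD_lt (x : List Int) (xs : List (List Int)) (v : List Int) :
    ((PySem.List.remove? (x :: xs) v).getD []).length < (x :: xs).length := by
  cases h : PySem.List.remove? (x :: xs) v with
  | none => simp
  | some r =>
      have hv : v ∈ x :: xs := by
        by_contra hv
        rw [(PySem.List.remove?_eq_none_iff _ _).mpr hv] at h
        cases h
      rw [PySem.List.remove?_eq_some_erase _ _ hv] at h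
      cases h
      simp [List.length_erase_of_mem hv]

-- B's inner loop: b = min(pool, key=lambda x: x[1]); task.append(b); pool.remove(b)
def pvSelLoop : List (List Int) → List (List Int) → List (List Int)
  | [], task => task
  | x :: xs, task =>
      let b := (PySem.List.min? (x :: xs) pvKey).getD []
      pvSelLoop ((PySem.List.remove? (x :: xs) b).getD []) (task ++ [b])
  termination_by pool _ => pool.length
  decreasing_by exact pv_remove_getD_lt x xs _

def duringTask_alt (current : Int) (jobs : List (List Int)) : Int × List Int × List (List Int) :=
  -- while k < len(jobs) and jobs[k][0] < current: k += 1
  let k := (jobs.takeWhile (fun j => decide ((PySem.List.pyGet? j 0).getD 0 < current))).length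
  -- pool = jobs[:k]; selection loop building task
  let task := pvSelLoop (jobs.take k) []
  let t0 := (PySem.List.pyGet? task 0).getD []   -- task[0]
  let time := current + (PySem.List.pyGet? t0 1).getD 0
  (time, [time - (PySem.List.pyGet? t0 0).getD 0],
   PySem.List.slice task (some 1) none ++ (jobs.drop k).take 1)   -- task[1:] + jobs[k:k+1]

-- ===== PRECONDITION & SPEC =====
-- Pre_ = exactly the inputs on which Python A returns: the prefix of jobs with j[0] < current is
-- nonempty and all its members have length ≥ 2 (else x[1]/j[0] raises IndexError), and the job the
-- loop breaks on, if any, is nonempty (else j[0] raises).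
def pvBreakOk (current : Int) : List (List Int) → Bool
  | [] => true                      -- loop exhausted jobs
  | [] :: _ => false                -- breaking job is []: j[0] raises
  | (a :: _) :: _ => decide (current ≤ a)

def Pre_duringTask (current : Int) (jobs : List (List Int)) : Prop :=
  let pref := jobs.takeWhile (fun j => decide (2 ≤ j.length ∧ (PySem.List.pyGet? j 0).getD 0 < current))
  pref ≠ [] ∧ pvBreakOk current (jobs.drop pref.length) = true

instance (current : Int) (jobs : List (List Int)) : Decidable (Pre_duringTask current jobs) := by
  unfold Pre_duringTask; infer_instance

def pvWitness_duringTask : Int × List (List Int) := (1, [[0, 2]])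

def Spec_duringTask (current : Int) (jobs : List (List Int)) (out : Int × List Int × List (List Int)) : Prop := out = duringTask_alt current jobs
instance (current : Int) (jobs : List (List Int)) (out : Int × List Int × List (List Int)) : Decidable (Spec_duringTask current jobs out) := by unfold Spec_duringTask; infer_instance

-- ===== CLAIM (what is proved, stated in full; the proofs are below) =====
def Claim_equal_duringTask : Prop := ∀ (current : Int) (jobs : List (List Int)), Dom_duringTask current jobs → Pre_duringTask current jobs → Spec_duringTask current jobs (duringTask current jobs)

-- ===== LEMMAS AND PROOFS =====

-- re-sorting an already sorted list with one appended element = one stable sort of the whole list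
lemma pv_sorted_snoc (t : List (List Int)) (j : List Int) :
    PySem.List.sorted (PySem.List.sorted t pvKey false ++ [j]) pvKey false
      = PySem.List.sorted (t ++ [j]) pvKey false := by
  rw [PySem.List.sorted_eq_foldl_insertBy, List.foldl_append]
  conv_rhs => rw [PySem.List.sorted_eq_foldl_insertBy, List.foldl_append]
  rw [← PySem.List.sorted_eq_foldl_insertBy, ← PySem.List.sorted_eq_foldl_insertBy,
      PySem.List.sorted_sorted]

-- A's loop = stable sort of the accumulated prefix, plus at most one breaking job in rest
lemma pv_aLoop_eq (current : Int) : ∀ (js t rest : List (List Int)),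
    pvALoop current (PySem.List.sorted t pvKey false) rest js =
      (PySem.List.sorted (t ++ js.takeWhile (fun j => pvCond current j)) pvKey false,
       rest ++ (js.drop (js.takeWhile (fun j => pvCond current j)).length).take 1) := by
  intro js
  induction js with
  | nil => intro t rest; simp [pvALoop]
  | cons j js ih =>
      intro t rest
      by_cases h : pvCond current j = true
      · rw [pvALoop, if_pos h, pv_sorted_snoc, ih (t ++ [j]) rest]
        simp [List.takeWhile_cons_of_pos h]
      · rw [pvALoop, if_neg h]
        simp [List.takeWhile_cons_of_neg h]

-- structural description of B's selection step: first job of minimal pvKey, and the rest in order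
def pvSelect : List (List Int) → List Int × List (List Int)
  | [] => ([], [])
  | [x] => (x, [])
  | x :: y :: ys =>
      let p := pvSelect (y :: ys)
      if pvKey p.1 < pvKey x then (p.1, x :: p.2) else (x, y :: ys)

lemma pv_select_snoc : ∀ (t : List (List Int)) (x : List Int), t ≠ [] →
    pvSelect (t ++ [x]) =
      if pvKey x < pvKey (pvSelect t).1 then (x, t)
      else ((pvSelect t).1, (pvSelect t).2 ++ [x]) := by
  intro t
  induction t with
  | nil => intro x h; exact absurd rfl h
  | cons a t' ih =>
      intro x _
      cases t' with
      | nil => simp [pvSelect]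
      | cons y ys =>
          have hne : (y :: ys : List (List Int)) ≠ [] := by simp
          have hih := ih x hne
          simp only [List.cons_append] at hih ⊢
          simp only [pvSelect]
          rw [hih]
          split_ifs <;> simp_all <;> try omega

lemma pv_select_len : ∀ (x : List Int) (xs : List (List Int)),
    (pvSelect (x :: xs)).2.length = xs.length := by
  intro x xs
  induction xs generalizing x with
  | nil => simp [pvSelect]
  | cons y ys ih =>
      simp only [pvSelect]
      split_ifs <;> simp [ih y]

-- min(pool, key) = the first minimal element = pvSelect's selection
def pvMinStep (acc : Option (List Int)) (x : List Int) : Option (List Int) :=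
  match acc with
  | none => some x
  | some m => if pvKey x < pvKey m then some x else some m

lemma pv_min_eq_foldl (xs : List (List Int)) :
    PySem.List.min? xs pvKey = xs.foldl pvMinStep none := by
  simp only [PySem.List.min?]
  congr 1
  funext acc x
  cases acc <;> rfl

lemma pv_min_snoc (t : List (List Int)) (x : List Int) :
    PySem.List.min? (t ++ [x]) pvKey =
      some (match PySem.List.min? t pvKey with
            | none => x
            | some m => if pvKey x < pvKey m then x else m) := by
  rw [pv_min_eq_foldl, List.foldl_append, List.foldl_cons, List.foldl_nil, ← pv_min_eq_foldl]
  cases h : PySem.List.min? t pvKey with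
  | none => simp [pvMinStep]
  | some m => simp only [pvMinStep]; split_ifs <;> rfl

lemma pv_min_eq_select : ∀ (t : List (List Int)), t ≠ [] →
    PySem.List.min? t pvKey = some (pvSelect t).1 := by
  intro t
  induction t using List.reverseRecOn with
  | nil => intro h; exact absurd rfl h
  | append_singleton t x ih =>
      intro _
      cases ht : t with
      | nil => simp [PySem.List.min?, pvSelect]
      | cons a t' =>
          have hne : t ≠ [] := by simp [ht]
          rw [← ht, pv_min_snoc, ih hne, pv_select_snoc t x hne]
          by_cases h : pvKey x < pvKey (pvSelect t).1 <;> simp [h]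

lemma pv_remove_eq_select : ∀ (t : List (List Int)), t ≠ [] →
    PySem.List.remove? t (pvSelect t).1 = some (pvSelect t).2 := by
  intro t
  induction t with
  | nil => intro h; exact absurd rfl h
  | cons a t' ih =>
      intro _
      cases t' with
      | nil => simp [pvSelect]
      | cons y ys =>
          simp only [pvSelect]
          split_ifs with h
          · have hne : a ≠ (pvSelect (y :: ys)).1 := by
              intro he; rw [he] at h; omega
            rw [PySem.List.remove?_cons_of_ne _ hne, ih (by simp)]
            rfl
          · exact PySem.List.remove?_cons_self _ _

-- the head of the stable sort is the first minimal element, and its tail sorts the rest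
lemma pv_insertBy_cons (bef : List Int → List Int → Bool) (x y : List Int) (ys : List (List Int)) :
    PySem.List.insertBy bef x (y :: ys) =
      if bef x y then x :: y :: ys else y :: PySem.List.insertBy bef x ys := rfl

lemma pv_sorted_snoc' (t : List (List Int)) (x : List Int) :
    PySem.List.sorted (t ++ [x]) pvKey false =
      PySem.List.insertBy (fun a b => decide (pvKey a < pvKey b)) x
        (PySem.List.sorted t pvKey false) := by
  rw [PySem.List.sorted_eq_foldl_insertBy, List.foldl_append, List.foldl_cons, List.foldl_nil,
      ← PySem.List.sorted_eq_foldl_insertBy]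

lemma pv_sorted_head : ∀ (t : List (List Int)), t ≠ [] →
    PySem.List.sorted t pvKey false =
      (pvSelect t).1 :: PySem.List.sorted (pvSelect t).2 pvKey false := by
  intro t
  induction t using List.reverseRecOn with
  | nil => intro h; exact absurd rfl h
  | append_singleton t x ih =>
      intro _
      cases ht : t with
      | nil => simp [pvSelect]; rfl
      | cons a t' =>
          have hne : t ≠ [] := by simp [ht]
          rw [← ht, pv_sorted_snoc' t x, ih hne, pv_insertBy_cons,
              pv_select_snoc t x hne]
          simp only [decide_eq_true_eq]
          split_ifs <;> simp [ih hne, pv_sorted_snoc']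

-- B's selection loop performs a stable sort of the pool
lemma pv_selLoop_eq : ∀ (n : Nat) (pool : List (List Int)), pool.length ≤ n →
    ∀ (task : List (List Int)),
      pvSelLoop pool task = task ++ PySem.List.sorted pool pvKey false := by
  intro n
  induction n with
  | zero =>
      intro pool hlen task
      have : pool = [] := List.length_eq_zero_iff.mp (Nat.le_zero.mp hlen)
      subst this
      simp [pvSelLoop]; rfl
  | succ n ih =>
      intro pool hlen task
      cases pool with
      | nil => simp [pvSelLoop]; rfl
      | cons x xs =>
          rw [pvSelLoop]
          rw [pv_min_eq_select (x :: xs) (by simp)]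
          simp only [Option.getD_some]
          rw [pv_remove_eq_select (x :: xs) (by simp)]
          simp only [Option.getD_some]
          rw [ih _ (by have := pv_select_len x xs; simp at hlen ⊢; omega)]
          rw [pv_sorted_head (x :: xs) (by simp)]
          simp

-- ===== VERDICT (by name: the statement is the Claim_ definition above) =====
theorem duringTask_spec : Claim_equal_duringTask := by
  unfold Claim_equal_duringTask
  intro current jobs _ _
  unfold Spec_duringTask duringTask duringTask_alt
  rw [show pvALoop current [] [] jobs
        = pvALoop current (PySem.List.sorted [] pvKey false) [] jobs from rfl,
      pv_aLoop_eq]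
  have htake : jobs.take
        (jobs.takeWhile (fun j => decide ((PySem.List.pyGet? j 0).getD 0 < current))).length
      = jobs.takeWhile (fun j => decide ((PySem.List.pyGet? j 0).getD 0 < current)) :=
    (List.prefix_iff_eq_take.mp (List.takeWhile_prefix _)).symm
  simp only [pvCond]
  rw [htake, pv_selLoop_eq _ _ (Nat.le_refl _)]
  simp
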